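-- pv_equiv track=rewrite | github.com/banashish/DS-Algo | coding Ninjas/DS/Searching/aggressive_cows.py | checkExists
-- ===== SOURCE A (Python) =====
-- def checkExists(arr,mid,cows):
--     j = 0
--     for i in range(cows-1):
--         x = j+1
--         if x >= len(arr):
--             return False
--         while arr[x] - arr[j] < mid:
--             if x >= len(arr)-1:
--                 return False
--             x+=1
--         j = x
--     else:
--         return True
-- ===== SOURCE B (Python) =====
-- def checkExists(arr, mid, cows):
--     # Single flat counting pass: count cows placed greedily, compare with cows.
--     if cows <= 1:
--         return True
--     count = 0
--     last = None
--     for v in arr: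
--         if last is None or v - last >= mid:
--             count += 1
--             last = v
--     return count >= cows
-- ===== Notes on version B (the rewrite author's own statement) =====
-- stated objective: simpler
-- what changed: Replaces A's index-based nested for/while with early returns by a single flat fold over the list that counts greedy placements and compares the count with cows at the end.
import Mathlib
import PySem

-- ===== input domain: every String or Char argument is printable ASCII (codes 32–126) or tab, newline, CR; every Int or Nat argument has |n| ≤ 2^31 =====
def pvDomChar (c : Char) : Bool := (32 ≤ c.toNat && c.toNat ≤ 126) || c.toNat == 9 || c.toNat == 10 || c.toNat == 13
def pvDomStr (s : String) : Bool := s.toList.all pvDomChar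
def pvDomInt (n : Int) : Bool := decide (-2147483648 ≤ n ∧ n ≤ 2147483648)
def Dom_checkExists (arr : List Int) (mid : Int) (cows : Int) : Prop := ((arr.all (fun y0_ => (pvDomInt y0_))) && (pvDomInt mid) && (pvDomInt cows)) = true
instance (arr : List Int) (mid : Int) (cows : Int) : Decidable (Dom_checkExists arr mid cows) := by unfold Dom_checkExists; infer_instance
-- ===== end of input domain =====

-- B replaces A's nested index-walking loops by one flat counting fold; objective: simpler.


-- ===== PORT A =====
-- inner `while arr[x] - arr[j] < mid` loop: returns `none` on the `return False`
-- inside it, otherwise `some x` with the final value of x (guards keep indices in range,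
-- so getD never sees its default)
def checkExistsWhile (arr : List Int) (mid : Int) (j : Nat) (x : Nat) : Option Nat :=
  if (arr.getD x 0) - (arr.getD j 0) < mid then
    if x ≥ arr.length - 1 then none
    else checkExistsWhile arr mid j (x + 1)
  else some x
termination_by arr.length - x
decreasing_by omega

-- `for i in range(cows-1)` loop with its two `return False` exits; fuel = remaining iterations
def checkExistsFor (arr : List Int) (mid : Int) (j : Nat) (fuel : Nat) : Bool :=
  match fuel with
  | 0 => true
  | n + 1 =>
    let x := j + 1
    if x ≥ arr.length then false
    else
      match checkExistsWhile arr mid j x with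
      | none => false
      | some x' => checkExistsFor arr mid x' n

def checkExists (arr : List Int) (mid : Int) (cows : Int) : Bool :=
  checkExistsFor arr mid 0 (cows - 1).toNat

-- ===== PORT B =====
-- flat pass: fold state (count, last placed position or none); final comparison count ≥ cows
def checkExists_alt (arr : List Int) (mid : Int) (cows : Int) : Bool :=
  if cows ≤ 1 then true
  else
    let s := arr.foldl
      (fun (s : Int × Option Int) v =>
        match s.2 with
        | none => (s.1 + 1, some v)
        | some last => if v - last ≥ mid then (s.1 + 1, some v) else s)
      (0, none)
    decide (s.1 ≥ cows)

-- ===== PRECONDITION & SPEC =====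
def Spec_checkExists (arr : List Int) (mid : Int) (cows : Int) (out : Bool) : Prop := out = checkExists_alt arr mid cows
instance (arr : List Int) (mid : Int) (cows : Int) (out : Bool) : Decidable (Spec_checkExists arr mid cows out) := by unfold Spec_checkExists; infer_instance

-- ===== CLAIM (what is proved, stated in full; the proofs are below) =====
def Claim_equal_checkExists : Prop := ∀ (arr : List Int) (mid : Int) (cows : Int), Dom_checkExists arr mid cows → Spec_checkExists arr mid cows (checkExists arr mid cows)

-- ===== LEMMAS AND PROOFS =====

-- common characterisation: greedy placement count after a cow at position l
def greedyCount (mid : Int) (l : Int) : List Int → Nat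
  | [] => 0
  | v :: r => if v - l ≥ mid then 1 + greedyCount mid v r else greedyCount mid l r

theorem greedy_cons_pos (mid l v : Int) (r : List Int) (h : v - l ≥ mid) :
    greedyCount mid l (v :: r) = 1 + greedyCount mid v r := by
  simp [greedyCount, h]

theorem greedy_cons_neg (mid l v : Int) (r : List Int) (h : ¬ v - l ≥ mid) :
    greedyCount mid l (v :: r) = greedyCount mid l r := by
  simp [greedyCount, h]

theorem checkExistsWhile_greedy (arr : List Int) (mid : Int) (j x : Nat)
    (hx : x < arr.length) :
    (checkExistsWhile arr mid j x = none ∧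
      greedyCount mid (arr.getD j 0) (arr.drop x) = 0) ∨
    (∃ x', checkExistsWhile arr mid j x = some x' ∧ x' < arr.length ∧
      greedyCount mid (arr.getD j 0) (arr.drop x) =
        1 + greedyCount mid (arr.getD x' 0) (arr.drop (x' + 1))) := by
  have hdrop : arr.drop x = arr.getD x 0 :: arr.drop (x + 1) := by
    rw [List.getD_eq_getElem _ _ hx]
    exact (List.drop_eq_getElem_cons hx)
  by_cases hc : (arr.getD x 0) - (arr.getD j 0) < mid
  · by_cases hend : x ≥ arr.length - 1
    · left
      constructor
      · unfold checkExistsWhile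
        rw [if_pos hc, if_pos hend]
      · have hx1 : arr.drop (x + 1) = [] := by
          apply List.drop_eq_nil_of_le; omega
        rw [hdrop, hx1, greedy_cons_neg _ _ _ _ (by omega)]
        rfl
    · have hx1 : x + 1 < arr.length := by omega
      have ih := checkExistsWhile_greedy arr mid j (x + 1) hx1
      have hstep : checkExistsWhile arr mid j x = checkExistsWhile arr mid j (x + 1) := by
        conv_lhs => unfold checkExistsWhile
        rw [if_pos hc, if_neg hend]
      have hg : greedyCount mid (arr.getD j 0) (arr.drop x) =
          greedyCount mid (arr.getD j 0) (arr.drop (x + 1)) := by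
        rw [hdrop, greedy_cons_neg _ _ _ _ (by omega)]
      rcases ih with ⟨h1, h2⟩ | ⟨x', h1, h2, h3⟩
      · left; exact ⟨hstep.trans h1, hg.trans h2⟩
      · right; exact ⟨x', hstep.trans h1, h2, hg.trans h3⟩
  · right
    refine ⟨x, ?_, hx, ?_⟩
    · unfold checkExistsWhile
      rw [if_neg hc]
    · rw [hdrop, greedy_cons_pos _ _ _ _ (by omega)]
termination_by arr.length - x
decreasing_by omega

theorem checkExistsFor_greedy (arr : List Int) (mid : Int) (fuel j : Nat)
    (hj : j < arr.length) :
    checkExistsFor arr mid j fuel =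
      decide (fuel ≤ greedyCount mid (arr.getD j 0) (arr.drop (j + 1))) := by
  induction fuel generalizing j with
  | zero => simp [checkExistsFor]
  | succ n ih =>
    rw [show checkExistsFor arr mid j (n + 1)
        = (if j + 1 ≥ arr.length then false
           else match checkExistsWhile arr mid j (j + 1) with
            | none => false
            | some x' => checkExistsFor arr mid x' n) from rfl]
    by_cases hx : j + 1 ≥ arr.length
    · have hnil : arr.drop (j + 1) = [] := by apply List.drop_eq_nil_of_le; omega
      rw [if_pos hx, hnil]
      have h0 : greedyCount mid (arr.getD j 0) [] = 0 := rfl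
      rw [h0]
      simp
    · have hx' : j + 1 < arr.length := by omega
      rw [if_neg hx]
      rcases checkExistsWhile_greedy arr mid j (j + 1) hx' with ⟨h1, h2⟩ | ⟨x', h1, h2, h3⟩
      · rw [h1, h2]; simp
      · rw [h1]
        rw [show (match some x' with
            | none => false
            | some x' => checkExistsFor arr mid x' n) = checkExistsFor arr mid x' n from rfl]
        rw [ih x' h2, h3]
        exact decide_eq_decide.mpr (by omega)

theorem foldl_count (mid : Int) (xs : List Int) (c : Int) (l : Int) :
    (List.foldl
      (fun (s : Int × Option Int) v =>
        match s.2 with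
        | none => (s.1 + 1, some v)
        | some last => if v - last ≥ mid then (s.1 + 1, some v) else s)
      (c, some l) xs).1 = c + (greedyCount mid l xs : Int) := by
  induction xs generalizing c l with
  | nil => simp [greedyCount]
  | cons v r ih =>
    by_cases hc : v - l ≥ mid
    · rw [List.foldl_cons]
      rw [show (match ((c, some l) : Int × Option Int).2 with
          | none => (c + 1, some v)
          | some last => if v - last ≥ mid then (c + 1, some v) else (c, some l))
          = (c + 1, some v) by simp [hc]]
      rw [ih, greedy_cons_pos _ _ _ _ hc]
      push_cast
      ring
    · rw [List.foldl_cons]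
      rw [show (match ((c, some l) : Int × Option Int).2 with
          | none => (c + 1, some v)
          | some last => if v - last ≥ mid then (c + 1, some v) else (c, some l))
          = (c, some l) by simp [hc]]
      rw [ih, greedy_cons_neg _ _ _ _ hc]

-- ===== VERDICT (by name: the statement is the Claim_ definition above) =====
theorem checkExists_spec : Claim_equal_checkExists := by
  intro arr mid cows _
  unfold Spec_checkExists checkExists checkExists_alt
  by_cases hcows : cows ≤ 1
  · have h0 : (cows - 1).toNat = 0 := by omega
    simp [h0, checkExistsFor, hcows]
  · rw [if_neg hcows]
    match arr with
    | [] =>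
      have hf : (cows - 1).toNat = ((cows - 1).toNat - 1) + 1 := by omega
      rw [hf]
      rw [show checkExistsFor [] mid 0 (((cows - 1).toNat - 1) + 1) = false from rfl]
      show false = decide ((0 : Int) ≥ cows)
      exact (decide_eq_false (by omega)).symm
    | a :: rest =>
      have hj : 0 < (a :: rest).length := by simp
      rw [checkExistsFor_greedy (a :: rest) mid (cows - 1).toNat 0 hj]
      rw [show ((a :: rest).getD 0 0) = a from rfl,
          show (a :: rest).drop (0 + 1) = rest from rfl]
      show decide ((cows - 1).toNat ≤ greedyCount mid a rest)
          = decide ((List.foldl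
              (fun (s : Int × Option Int) v =>
                match s.2 with
                | none => (s.1 + 1, some v)
                | some last => if v - last ≥ mid then (s.1 + 1, some v) else s)
              ((0 : Int) + 1, some a) rest).1 ≥ cows)
      rw [show ((List.foldl
              (fun (s : Int × Option Int) v =>
                match s.2 with
                | none => (s.1 + 1, some v)
                | some last => if v - last ≥ mid then (s.1 + 1, some v) else s)
              ((0 : Int) + 1, some a) rest).1)
          = (0 : Int) + 1 + (greedyCount mid a rest : Int) from foldl_count mid rest _ a]
      exact decide_eq_decide.mpr (by omega)
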